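-- pv_equiv track=rewrite | github.com/Pablo-Ali/Programacion_1_UTN | Clase_11_ejercicios.py | ordenar_lista_descendente
-- ===== SOURCE A (Python) =====
-- def ordenar_lista_descendente(lista : list) -> bool:
--     '''
--     Función que recibe un arreglo de números y lo ordena de menor
--     a mayor.
--     Retorna True si hubo cambios, False si ya estaba ordenado.
--     '''
--
--     flag = 1
--     ordenada = False
--
--     while flag:
--         flag = 0
--         for i in range (len(lista) - 1):
--             if lista[i] < lista[i + 1]:
--                 aux = lista[i]
--                 lista[i] = lista[i + 1]
--                 lista[i + 1] = aux
--                 flag = 1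
--                 ordenada = True
--
--     return ordenada
-- ===== SOURCE B (Python) =====
-- def ordenar_lista_descendente(lista : list) -> bool:
--     changed = any(x < y for x, y in zip(lista, lista[1:]))
--     lista.sort(reverse=True)
--     return changed
-- ===== Notes on version B (the rewrite author's own statement) =====
-- stated objective: faster
-- what changed: Replaces the repeated bubble-sort passes with a single adjacent-pair scan to compute the changed flag plus one library sort (Timsort) to order the list, instead of deriving the flag from swap activity.
import Mathlib
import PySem

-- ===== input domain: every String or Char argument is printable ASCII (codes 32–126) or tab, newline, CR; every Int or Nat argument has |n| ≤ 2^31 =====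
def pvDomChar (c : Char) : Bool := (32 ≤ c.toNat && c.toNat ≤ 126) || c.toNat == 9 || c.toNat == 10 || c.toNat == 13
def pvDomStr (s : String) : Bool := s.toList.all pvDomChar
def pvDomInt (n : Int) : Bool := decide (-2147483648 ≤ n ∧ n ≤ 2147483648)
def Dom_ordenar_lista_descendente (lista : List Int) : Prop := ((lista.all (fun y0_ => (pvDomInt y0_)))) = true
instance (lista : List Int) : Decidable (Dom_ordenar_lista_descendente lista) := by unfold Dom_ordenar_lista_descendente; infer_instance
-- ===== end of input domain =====

-- B replaces bubble-sort passes by one adjacent-pair scan + a library sort; equivalence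
-- is about the RETURN value only (both Pythons sort the list descending in place).

-- ===== PORT A =====
-- one inner 'for i in range(len(lista)-1)' pass of adjacent swaps; returns (list after pass, flag)
def pvPassA : List Int → List Int × Bool
  | [] => ([], false)
  | [a] => ([a], false)
  | a :: b :: rest =>
    if a < b then
      -- swap, flag = 1, continue scanning from the next index with a now at position i+1
      let r := pvPassA (a :: rest)
      (b :: r.1, true)
    else
      let r := pvPassA (b :: rest)
      (a :: r.1, r.2)

-- the 'while flag' loop; fuel only makes the recursion total (the fallback returns the
-- current ordenada, which after the first pass never changes)
def pvLoopA : Nat → List Int → Bool → Bool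
  | 0, _, ordenada => ordenada
  | fuel + 1, lista, ordenada =>
    let r := pvPassA lista
    if r.2 then pvLoopA fuel r.1 true else ordenada

def ordenar_lista_descendente (lista : List Int) : Bool :=
  pvLoopA (lista.length + 1) lista false

-- ===== PORT B =====
def ordenar_lista_descendente_alt (lista : List Int) : Bool :=
  (lista.zip (lista.drop 1)).any (fun p => decide (p.1 < p.2))

-- ===== PRECONDITION & SPEC =====
def Spec_ordenar_lista_descendente (lista : List Int) (out : Bool) : Prop := out = ordenar_lista_descendente_alt lista
instance (lista : List Int) (out : Bool) : Decidable (Spec_ordenar_lista_descendente lista out) := by unfold Spec_ordenar_lista_descendente; infer_instance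

-- ===== CLAIM (what is proved, stated in full; the proofs are below) =====
def Claim_equal_ordenar_lista_descendente : Prop := ∀ (lista : List Int), Dom_ordenar_lista_descendente lista → Spec_ordenar_lista_descendente lista (ordenar_lista_descendente lista)

-- ===== LEMMAS AND PROOFS =====

-- once ordenada is true it stays true
theorem pvLoopA_true (fuel : Nat) : ∀ (l : List Int), pvLoopA fuel l true = true := by
  induction fuel with
  | zero => intro l; rfl
  | succ n ih =>
    intro l
    simp only [pvLoopA]
    split <;> simp [ih]

-- the returned flag equals the first pass's swap flag
theorem pvLoopA_eq_flag (l : List Int) (fuel : Nat) :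
    pvLoopA (fuel + 1) l false = (pvPassA l).2 := by
  simp only [pvLoopA]
  split <;> simp_all [pvLoopA_true]

-- the first pass swaps iff some adjacent pair rises
theorem pvPassA_flag (l : List Int) :
    (pvPassA l).2 = (l.zip (l.drop 1)).any (fun p => decide (p.1 < p.2)) := by
  match l with
  | [] => simp [pvPassA]
  | [a] => simp [pvPassA]
  | a :: b :: rest =>
    simp only [pvPassA]
    by_cases h : a < b
    · simp [h]
    · simpa [h] using pvPassA_flag (b :: rest)

-- ===== VERDICT (by name: the statement is the Claim_ definition above) =====
theorem ordenar_lista_descendente_spec : Claim_equal_ordenar_lista_descendente := by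
  intro lista _
  unfold Spec_ordenar_lista_descendente ordenar_lista_descendente ordenar_lista_descendente_alt
  rw [pvLoopA_eq_flag, pvPassA_flag]
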